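-- pv_equiv track=rewrite | github.com/karthikcpatel/CrackDSA | hackerrank/Find Flasky Tests.py | find_flaky_tests
-- ===== SOURCE A (Python) =====
-- def find_flaky_tests(test_results):
--     result_map = {}
--
--     # Step 1: Collect results per test case
--     for test_id, status in test_results:
--         if test_id not in result_map:
--             result_map[test_id] = set()
--         result_map[test_id].add(status)
--
--     # Step 2: Identify flaky tests
--     flaky_tests = []
--     for test_id, statuses in result_map.items():
--         if len(statuses) > 1:
--             flaky_tests.append(test_id)
--
--     return flaky_tests
-- ===== SOURCE B (Python) =====
-- def find_flaky_tests(test_results):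
--     # Pass 1: test ids in first-appearance order, deduplicated.
--     order = []
--     for test_id, _ in test_results:
--         if test_id not in order:
--             order.append(test_id)
--
--     # Pass 2: an id is flaky iff some recorded status differs from its first one.
--     def is_flaky(test_id):
--         statuses = [s for t, s in test_results if t == test_id]
--         return any(s != statuses[0] for s in statuses)
--
--     return [test_id for test_id in order if is_flaky(test_id)]
-- ===== Notes on version B (the rewrite author's own statement) =====
-- stated objective: alternative
-- what changed: B replaces A's single hash-grouping pass (a dict of status-sets filtered by size) with two staged list passes and no dict or set at all: first an ordered dedup of the test ids, then for each id a direct rescan of test_results checking whether any status differs from the id's first status.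
import Mathlib
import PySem

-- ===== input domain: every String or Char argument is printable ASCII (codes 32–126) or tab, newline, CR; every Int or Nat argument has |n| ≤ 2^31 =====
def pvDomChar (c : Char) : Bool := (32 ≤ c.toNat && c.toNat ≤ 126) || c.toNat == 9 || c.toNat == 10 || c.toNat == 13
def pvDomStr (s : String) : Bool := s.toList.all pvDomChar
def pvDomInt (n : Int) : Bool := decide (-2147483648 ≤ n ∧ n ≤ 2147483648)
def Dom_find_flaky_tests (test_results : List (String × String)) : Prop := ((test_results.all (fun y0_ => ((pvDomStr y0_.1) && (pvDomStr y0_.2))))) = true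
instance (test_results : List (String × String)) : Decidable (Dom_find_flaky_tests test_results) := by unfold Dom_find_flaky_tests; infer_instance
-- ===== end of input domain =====

-- B replaces A's dict-of-status-sets grouping with two staged passes and no dict/set:
-- an ordered dedup of ids, then a direct rescan per id comparing statuses to the first one.


-- ===== PORT A =====
-- loop body of A's step 1: ensure a set exists for the id, then add the status
def pvStepA (m : PySem.Dict String (PySem.Set String)) (p : String × String) :
    PySem.Dict String (PySem.Set String) :=
  let m := if m.contains p.1 then m else m.insert p.1 PySem.Set.empty
  m.modify p.1 PySem.Set.empty (fun s => PySem.Set.add s p.2)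

def find_flaky_tests (test_results : List (String × String)) : List String :=
  let result_map := test_results.foldl pvStepA PySem.Dict.empty
  result_map.items.foldl
    (fun flaky_tests it => if 1 < it.2.length then flaky_tests ++ [it.1] else flaky_tests) []

-- ===== PORT B =====
-- '[s for t, s in test_results if t == test_id]'
def pvStatuses (test_results : List (String × String)) (test_id : String) : List String :=
  (test_results.filter (fun p => p.1 == test_id)).map Prod.snd

-- 'any(s != statuses[0] for s in statuses)': Python evaluates statuses[0] only for an
-- element of statuses, so statuses is nonempty there and getD 0 "" is exact.
def pvIsFlaky (test_results : List (String × String)) (test_id : String) : Bool :=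
  let statuses := pvStatuses test_results test_id
  statuses.any (fun s => s != statuses.getD 0 "")

def find_flaky_tests_alt (test_results : List (String × String)) : List String :=
  let order := test_results.foldl
    (fun acc p => if acc.contains p.1 then acc else acc ++ [p.1]) []
  order.filter (fun test_id => pvIsFlaky test_results test_id)

-- ===== PRECONDITION & SPEC =====
def Spec_find_flaky_tests (test_results : List (String × String)) (out : List String) : Prop := out = find_flaky_tests_alt test_results
instance (test_results : List (String × String)) (out : List String) : Decidable (Spec_find_flaky_tests test_results out) := by unfold Spec_find_flaky_tests; infer_instance

-- ===== CLAIM (what is proved, stated in full; the proofs are below) =====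
def Claim_equal_find_flaky_tests : Prop := ∀ (test_results : List (String × String)), Dom_find_flaky_tests test_results → Spec_find_flaky_tests test_results (find_flaky_tests test_results)

-- ===== LEMMAS AND PROOFS =====

-- A's two-step body is one dict.modify with Set.add
theorem pvStepA_eq_modify (d : PySem.Dict String (PySem.Set String)) (p : String × String) :
    pvStepA d p = d.modify p.1 PySem.Set.empty (fun s => PySem.Set.add s p.2) := by
  unfold pvStepA
  by_cases hc : d.contains p.1 = true
  · simp [hc]
  · simp only [Bool.not_eq_true] at hc
    simp only [hc, Bool.false_eq_true, if_false]
    simp [PySem.Dict.modify, PySem.Dict.insert_insert_self,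
      PySem.Set.add]
    rw [PySem.Dict.getD_of_not_contains d [] hc]
    simp

-- value of A's grouping fold at any key: the distinct statuses of that id, in order
theorem pvGetD_foldA (l : List (String × String)) (d : PySem.Dict String (PySem.Set String))
    (c : String) :
    (l.foldl pvStepA d).getD c PySem.Set.empty
      = PySem.Set.update (d.getD c PySem.Set.empty) (pvStatuses l c) := by
  induction l generalizing d with
  | nil => simp [pvStatuses, PySem.Set.update]
  | cons p l ih =>
      rw [List.foldl_cons, ih, pvStepA_eq_modify, PySem.Dict.getD_modify]
      by_cases hk : c = p.1
      · subst hk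
        simp [pvStatuses, PySem.Set.update_cons]
      · have : ¬ (p.1 == c) = true := by simpa using fun h => hk h.symm
        simp [pvStatuses, hk, this]

-- keys of A's grouping fold = B's ordered dedup of the ids
theorem pvKeys_foldA (l : List (String × String)) :
    (l.foldl pvStepA PySem.Dict.empty).keys
      = l.foldl (fun acc p => if acc.contains p.1 then acc else acc ++ [p.1]) [] := by
  have h1 : (l.foldl pvStepA PySem.Dict.empty)
      = l.foldl (fun d p => d.modify p.1 PySem.Set.empty (fun s => PySem.Set.add s p.2))
          PySem.Dict.empty := by
    apply PySem.List.foldl_congr_mem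
    intro d p _; exact pvStepA_eq_modify d p
  rw [h1, PySem.Dict.keys_foldl_modify_key (key := Prod.fst)]
  rw [PySem.Dict.keys_empty]
  have h2 : PySem.Set.update ([] : PySem.Set String) (l.map Prod.fst)
      = l.foldl (fun s p => PySem.Set.add s p.1) [] := by
    rw [PySem.Set.update_map_eq_foldl_add]
  rw [h2]
  apply PySem.List.foldl_congr_mem
  intro s p _
  simp [PySem.Set.add]

-- a deduplicated list has more than one element iff some element differs from the first
theorem pvLen_ofList_iff (xs : List String) :
    (1 < (PySem.Set.ofList xs).length) ↔ ∃ y ∈ xs, y ≠ xs.getD 0 "" := by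
  cases xs with
  | nil => simp [PySem.Set.ofList]
  | cons a t =>
      rw [PySem.Set.ofList_cons]
      simp only [List.length_cons, List.getD_cons_zero]
      constructor
      · intro h
        have hne : PySem.Set.discard (PySem.Set.ofList t) a ≠ [] := by
          intro h0; rw [h0] at h; simp at h
        obtain ⟨y, hy⟩ := List.exists_mem_of_ne_nil _ hne
        have := (PySem.Set.mem_discard (PySem.Set.ofList t) a y).mp hy
        exact ⟨y, List.mem_cons.mpr (Or.inr ((PySem.Set.mem_ofList t y).mp this.1)), this.2⟩
      · rintro ⟨y, hy, hne⟩
        rw [List.mem_cons] at hy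
        rcases hy with hy | hy
        · exact absurd hy hne
        · have : y ∈ PySem.Set.discard (PySem.Set.ofList t) a :=
            (PySem.Set.mem_discard _ _ _).mpr ⟨(PySem.Set.mem_ofList t y).mpr hy, hne⟩
          have := List.length_pos_of_mem this
          omega

theorem find_flaky_tests_eq_alt (test_results : List (String × String)) :
    find_flaky_tests test_results = find_flaky_tests_alt test_results := by
  unfold find_flaky_tests find_flaky_tests_alt
  set d := test_results.foldl pvStepA PySem.Dict.empty with hd
  set order := test_results.foldl
    (fun acc p => if acc.contains p.1 then acc else acc ++ [p.1]) [] with horder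
  have hkeys : d.keys = order := pvKeys_foldA test_results
  have hnd : d.keys.Nodup := by
    rw [hd]
    have h1 : (test_results.foldl pvStepA PySem.Dict.empty)
        = test_results.foldl
            (fun d p => d.modify p.1 PySem.Set.empty (fun s => PySem.Set.add s p.2))
            PySem.Dict.empty := by
      apply PySem.List.foldl_congr_mem
      intro d p _; exact pvStepA_eq_modify d p
    rw [h1]
    exact PySem.Dict.nodup_keys_foldl_modify_key _ _ _ _ _ (by simp [PySem.Dict.keys_empty])
  have hA : d.items.foldl
      (fun flaky_tests it => if 1 < it.2.length then flaky_tests ++ [it.1] else flaky_tests) []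
      = (d.items.filter (fun it => decide (1 < it.2.length))).map Prod.fst := by
    have := PySem.List.foldl_append_if (fun it : String × PySem.Set String =>
      decide (1 < it.2.length)) Prod.fst d.items []
    simpa using this
  rw [hA, PySem.Dict.items_eq_map_keys d hnd PySem.Set.empty, List.filter_map, List.map_map]
  have hcomp : ((fun it : String × PySem.Set String => decide (1 < it.2.length)) ∘
      fun k => (k, d.getD k PySem.Set.empty)) =
      fun k => decide (1 < (d.getD k PySem.Set.empty).length) := rfl
  have hfst : (Prod.fst ∘ fun k => (k, d.getD k PySem.Set.empty)) = fun k : String => k := rfl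
  rw [hcomp, hfst, List.map_id', hkeys]
  apply List.filter_congr
  intro k _
  have hget : d.getD k PySem.Set.empty = PySem.Set.ofList (pvStatuses test_results k) := by
    rw [hd, pvGetD_foldA, PySem.Dict.getD_empty]
    rfl
  rw [hget]
  cases hfl : pvIsFlaky test_results k with
  | true =>
      simp only [pvIsFlaky, List.any_eq_true, bne_iff_ne] at hfl
      simp [(pvLen_ofList_iff _).mpr hfl]
  | false =>
      have hall : ∀ y ∈ pvStatuses test_results k,
          y = (pvStatuses test_results k).getD 0 "" := by
        intro y hy
        by_contra hne
        have : pvIsFlaky test_results k = true := by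
          simp only [pvIsFlaky, List.any_eq_true, bne_iff_ne]
          exact ⟨y, hy, hne⟩
        rw [this] at hfl; cases hfl
      have hnot : ¬ 1 < (PySem.Set.ofList (pvStatuses test_results k)).length := by
        rw [pvLen_ofList_iff]; rintro ⟨y, hy, hne⟩; exact hne (hall y hy)
      simp [hnot]

-- ===== VERDICT (by name: the statement is the Claim_ definition above) =====
theorem find_flaky_tests_spec : Claim_equal_find_flaky_tests := by
  intro test_results _
  unfold Spec_find_flaky_tests
  exact find_flaky_tests_eq_alt test_results
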